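-- pv_equiv track=rewrite | github.com/bc36/leetcode | lc_Python/lc2600_2699.py | makeSubKSumEqual
-- ===== SOURCE A (Python) =====
-- from typing import List, Optional, Tuple
--
-- def makeSubKSumEqual(arr: List[int], k: int) -> int:
--     n = len(arr)
--     vis = [False] * n
--     ans = 0
--     for i in range(n):
--         if not vis[i]:
--             x = i
--             l = []
--             while not vis[x]:
--                 vis[x] = True
--                 l.append(arr[x])
--                 x = (x + k) % n
--             mid = sorted(l)[len(l) // 2]
--
--             # 注意, 最大值和最小值移动到 target 的和是一定的
--             # 不断去除不影响结果的 最大/小值 之后, 若剩余偶数, 任选一个即可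
--             # mid = sorted(l)[(len(l) - 1) // 2]
--
--             ans += sum(abs(x - mid) for x in l)
--     return ans
-- ===== SOURCE B (Python) =====
-- from math import gcd
-- from typing import List
--
-- def makeSubKSumEqual(arr: List[int], k: int) -> int:
--     # Cycles of i -> (i+k) % n are exactly the residue classes mod g = gcd(n, k),
--     # so collect each class directly instead of walking cycles with a visited array.
--     n = len(arr)
--     if n == 0:
--         return 0
--     g = gcd(n, k % n)
--     ans = 0
--     for b in range(g):
--         cyc = [arr[j] for j in range(b, n, g)]
--         mid = sorted(cyc)[len(cyc) // 2]
--         ans += sum(abs(v - mid) for v in cyc)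
--     return ans
-- ===== Notes on version B (the rewrite author's own statement) =====
-- stated objective: alternative
-- what changed: A walks each cycle with a visited array and an inner while loop; B computes g = gcd(n, k % n) and reads each cycle off directly as the residue class {b, b+g, b+2g, ...}, eliminating the visited array and the cycle walk.
import Mathlib
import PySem

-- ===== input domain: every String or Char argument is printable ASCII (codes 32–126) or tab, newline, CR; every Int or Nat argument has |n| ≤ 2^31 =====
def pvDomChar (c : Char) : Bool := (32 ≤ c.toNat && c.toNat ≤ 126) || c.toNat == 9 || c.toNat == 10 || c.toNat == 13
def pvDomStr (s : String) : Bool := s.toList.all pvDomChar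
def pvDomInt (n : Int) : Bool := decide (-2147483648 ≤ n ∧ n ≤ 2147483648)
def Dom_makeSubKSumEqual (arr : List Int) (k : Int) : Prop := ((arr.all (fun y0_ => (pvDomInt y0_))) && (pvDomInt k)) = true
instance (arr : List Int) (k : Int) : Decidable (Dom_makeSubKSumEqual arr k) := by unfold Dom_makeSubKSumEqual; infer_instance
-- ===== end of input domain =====

-- B replaces A's visited-array cycle walk by the closed-form cycle structure:
-- the cycles of i -> (i+k) % n are exactly the residue classes mod gcd(n, k % n),
-- collected by a stride-g index range (objective: alternative, same asymptotic cost).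


-- ===== PORT A =====
-- abs(x) for Int
def pyAbsI (x : Int) : Int := if x < 0 then -x else x

-- inner 'while not vis[x]' loop of A, with fuel n+1 (each iteration marks one
-- unvisited index and the loop stops at a visited one, so n+1 steps always suffice);
-- indices x are always in [0, n) here (x = (x+k) % n with n > 0), so getD/toNat are exact
def walkA (arr : List Int) (k : Int) (n : Nat) : Nat -> Nat -> List Bool -> List Int -> List Bool × List Int
  | 0, _, vis, l => (vis, l)
  | fuel+1, x, vis, l =>
    if vis.getD x false then (vis, l)
    else walkA arr k n fuel (PySem.Int.mod ((x : Int) + k) (n : Int)).toNat (vis.set x true)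
           (l ++ [arr.getD x 0])

-- body of A's 'for i in range(n)' loop; state = (vis, ans)
def bodyA (arr : List Int) (k : Int) (n : Nat) (st : List Bool × Int) (i : Nat) : List Bool × Int :=
  if st.1.getD i false then st
  else
    let r := walkA arr k n (n+1) i st.1 []
    let mid := (PySem.List.sorted r.2 (fun v => v) false).getD (r.2.length / 2) 0
    (r.1, st.2 + (r.2.map (fun v => pyAbsI (v - mid))).sum)

def makeSubKSumEqual (arr : List Int) (k : Int) : Int :=
  let n := arr.length
  ((List.range n).foldl (bodyA arr k n) (List.replicate n false, 0)).2

-- ===== PORT B =====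
-- B: cycles of i -> (i+k) % n are the residue classes mod g = gcd(n, k % n);
-- collect each class by a stride-g range instead of walking with a visited array
def bodyB (arr : List Int) (n g : Nat) (ans : Int) (b : Nat) : Int :=
  let cyc := (PySem.List.pyRange (b : Int) (n : Int) (g : Int)).map (fun j => PySem.List.pyGetD arr j 0)
  let mid := (PySem.List.sorted cyc (fun v => v) false).getD (cyc.length / 2) 0
  ans + (cyc.map (fun v => pyAbsI (v - mid))).sum

def makeSubKSumEqual_alt (arr : List Int) (k : Int) : Int :=
  let n := arr.length
  if n = 0 then 0
  else
    let g := Nat.gcd n (PySem.Int.mod k (n : Int)).toNat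
    (List.range g).foldl (bodyB arr n g) 0

-- ===== PRECONDITION & SPEC =====
def Spec_makeSubKSumEqual (arr : List Int) (k : Int) (out : Int) : Prop := out = makeSubKSumEqual_alt arr k
instance (arr : List Int) (k : Int) (out : Int) : Decidable (Spec_makeSubKSumEqual arr k out) := by unfold Spec_makeSubKSumEqual; infer_instance

-- ===== CLAIM (what is proved, stated in full; the proofs are below) =====
def Claim_equal_makeSubKSumEqual : Prop := ∀ (arr : List Int) (k : Int), Dom_makeSubKSumEqual arr k → Spec_makeSubKSumEqual arr k (makeSubKSumEqual arr k)

-- ===== LEMMAS AND PROOFS =====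

def idxW (n kr b t : Nat) : Nat := (b + t * kr) % n

def visW (n kr g b t : Nat) : List Bool :=
  (List.range n).map (fun j => decide (j % g < b ∨ ∃ s < t, idxW n kr b s = j))

def visP (n g b : Nat) : List Bool := (List.range n).map (fun j => decide (j % g < b))

def orbL (arr : List Int) (n kr b t : Nat) : List Int :=
  (List.range t).map (fun s => arr.getD (idxW n kr b s) 0)

def cycB (arr : List Int) (n g b : Nat) : List Int :=
  (PySem.List.pyRange (b : Int) (n : Int) (g : Int)).map (fun j => PySem.List.pyGetD arr j 0)

def costL (l : List Int) : Int :=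
  (l.map (fun v => pyAbsI (v - (PySem.List.sorted l (fun v => v) false).getD (l.length / 2) 0))).sum

theorem step_eq (k : Int) (n : Nat) (hn : 0 < n) (x : Nat) :
    (PySem.Int.mod ((x : Int) + k) (n : Int)).toNat
      = (x + (PySem.Int.mod k (n : Int)).toNat) % n := by
  have hpos : (0:Int) < (n:Int) := by exact_mod_cast hn
  rw [PySem.Int.mod_eq_emod_of_pos hpos, PySem.Int.mod_eq_emod_of_pos hpos]
  have h1 : ((x : Int) + k) % n = ((x : Int) + k % n) % n := by
    rw [Int.add_emod, Int.add_emod (x : Int) (k % (n:Int)), Int.emod_emod_of_dvd k (dvd_refl ((n:Int)))]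
  have hk0 : 0 ≤ k % (n:Int) := Int.emod_nonneg k (by omega)
  have hk : k % (n:Int) = ((k % (n:Int)).toNat : Int) := by omega
  rw [h1, hk]
  rw [show ((x : Int) + ((k % (n:Int)).toNat : Int)) = ((x + (k % (n:Int)).toNat : Nat) : Int) by push_cast; ring]
  rw [← Int.natCast_mod, Int.toNat_natCast]
  rw [Int.toNat_natCast]

theorem idx_lt (n kr b t : Nat) (hn : 0 < n) : idxW n kr b t < n := Nat.mod_lt _ hn

theorem idx_zero (n kr b : Nat) (hb : b < n) : idxW n kr b 0 = b := by
  simp [idxW, Nat.mod_eq_of_lt hb]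

theorem idx_step (n kr b t : Nat) :
    idxW n kr b (t+1) = (idxW n kr b t + kr) % n := by
  unfold idxW
  rw [Nat.mod_add_mod]
  ring_nf

theorem idx_mod (n kr b t : Nat) (hb : b < Nat.gcd n kr) :
    idxW n kr b t % Nat.gcd n kr = b := by
  set g := Nat.gcd n kr with hgdef
  have hgn : g ∣ n := Nat.gcd_dvd_left n kr
  obtain ⟨K, hK⟩ : g ∣ kr := Nat.gcd_dvd_right n kr
  calc (b + t * kr) % n % g = (b + t * kr) % g := Nat.mod_mod_of_dvd _ hgn
    _ = b % g := by rw [hK, show b + t * (g * K) = b + (t * K) * g by ring, Nat.add_mul_mod_self_right]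
    _ = b := Nat.mod_eq_of_lt hb

theorem idx_inj_le (n kr b : Nat) (hn : 0 < n)
    {s t : Nat} (hle : s ≤ t) (ht : t < n / Nat.gcd n kr)
    (h : idxW n kr b s = idxW n kr b t) : s = t := by
  set g := Nat.gcd n kr with hgdef
  have hg : 0 < g := Nat.gcd_pos_of_pos_left kr hn
  by_contra hne
  have hlt : s < t := lt_of_le_of_ne hle hne
  have h2 : s * kr ≡ t * kr [MOD n] := Nat.ModEq.add_left_cancel' b h
  have hdvd : n ∣ t * kr - s * kr := (Nat.modEq_iff_dvd' (Nat.mul_le_mul_right kr hle)).mp h2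
  rw [← Nat.sub_mul] at hdvd
  obtain ⟨N, hN⟩ : g ∣ n := Nat.gcd_dvd_left n kr
  obtain ⟨K, hK⟩ : g ∣ kr := Nat.gcd_dvd_right n kr
  have hNg : n / g = N := by rw [hN]; exact Nat.mul_div_cancel_left N hg
  have hKg : kr / g = K := by rw [hK]; exact Nat.mul_div_cancel_left K hg
  have hco : N.Coprime K := by
    have := Nat.coprime_div_gcd_div_gcd (m := n) (n := kr) hg
    rwa [← hgdef, hNg, hKg] at this
  have hdvd2 : N ∣ (t - s) * K := by
    have hh : g * N ∣ g * ((t - s) * K) := by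
      rw [← hN, show g * ((t - s) * K) = (t - s) * (g * K) by ring, ← hK]; exact hdvd
    exact (Nat.mul_dvd_mul_iff_left hg).mp hh
  have hdvd3 : N ∣ t - s := hco.dvd_of_dvd_mul_right hdvd2
  have htN : t < N := by rwa [hNg] at ht
  have : N ≤ t - s := Nat.le_of_dvd (by omega) hdvd3
  omega

theorem idx_inj (n kr b : Nat) (hn : 0 < n)
    {s t : Nat} (hs : s < n / Nat.gcd n kr) (ht : t < n / Nat.gcd n kr)
    (h : idxW n kr b s = idxW n kr b t) : s = t := by
  rcases le_total s t with hle | hle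
  · exact idx_inj_le n kr b hn hle ht h
  · exact (idx_inj_le n kr b hn hle hs h.symm).symm

theorem idx_ord (n kr b : Nat) (hn : 0 < n) (hb : b < n) :
    idxW n kr b (n / Nat.gcd n kr) = b := by
  set g := Nat.gcd n kr with hgdef
  have hg : 0 < g := Nat.gcd_pos_of_pos_left kr hn
  obtain ⟨K, hK⟩ : g ∣ kr := Nat.gcd_dvd_right n kr
  have hng : g ∣ n := Nat.gcd_dvd_left n kr
  have hNgn : n / g * g = n := Nat.div_mul_cancel hng
  unfold idxW
  rw [hK, show b + n / g * (g * K) = b + K * (n / g * g) by ring, hNgn,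
      Nat.add_mul_mod_self_right, Nat.mod_eq_of_lt hb]

-- the residue class of b as an image
theorem class_eq_image (n g b : Nat) (hg : 0 < g) (hgn : g ∣ n) (hb : b < g) :
    (Finset.range n).filter (fun j => j % g = b)
      = Finset.image (fun i => b + i * g) (Finset.range (n / g)) := by
  ext j
  simp only [Finset.mem_filter, Finset.mem_range, Finset.mem_image]
  constructor
  · rintro ⟨hjn, hjb⟩
    refine ⟨j / g, ?_, ?_⟩
    · rw [Nat.div_lt_iff_lt_mul hg, Nat.div_mul_cancel hgn]; exact hjn
    · conv_rhs => rw [← Nat.div_add_mod j g]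
      rw [hjb]; ring
  · rintro ⟨i, hi, rfl⟩
    constructor
    · have : b + i * g < g + i * g := by omega
      have h2 : g + i * g = (i + 1) * g := by ring
      have h3 : (i + 1) * g ≤ n / g * g := Nat.mul_le_mul_right g (by omega)
      rw [Nat.div_mul_cancel hgn] at h3
      omega
    · rw [Nat.add_mul_mod_self_right, Nat.mod_eq_of_lt hb]

theorem idx_surj (n kr b : Nat) (hn : 0 < n) (hb : b < Nat.gcd n kr) :
    ∀ j < n, j % Nat.gcd n kr = b → ∃ s < n / Nat.gcd n kr, idxW n kr b s = j := by
  set g := Nat.gcd n kr with hgdef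
  have hg : 0 < g := Nat.gcd_pos_of_pos_left kr hn
  have hgn : g ∣ n := Nat.gcd_dvd_left n kr
  set N := n / g with hNdef
  have hcard2 : ((Finset.range n).filter (fun j => j % g = b)).card = N := by
    rw [class_eq_image n g b hg hgn hb, Finset.card_image_of_injOn, Finset.card_range]
    intro a _ c _ h
    simp only at h
    exact Nat.eq_of_mul_eq_mul_right hg (Nat.add_left_cancel h)
  have hsub : Finset.image (fun s => idxW n kr b s) (Finset.range N)
      ⊆ (Finset.range n).filter (fun j => j % g = b) := by
    intro j hj
    simp only [Finset.mem_image, Finset.mem_range] at hj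
    obtain ⟨s, _, rfl⟩ := hj
    simp only [Finset.mem_filter, Finset.mem_range]
    exact ⟨idx_lt n kr b s hn, idx_mod n kr b s hb⟩
  have hcard1 : (Finset.image (fun s => idxW n kr b s) (Finset.range N)).card = N := by
    rw [Finset.card_image_of_injOn, Finset.card_range]
    intro a ha c hc h
    simp only [Finset.coe_range, Set.mem_Iio] at ha hc
    exact idx_inj n kr b hn ha hc h
  have heq := Finset.eq_of_subset_of_card_le hsub (by rw [hcard1, hcard2])
  intro j hjn hjb
  have : j ∈ (Finset.range n).filter (fun j => j % g = b) := by
    simp only [Finset.mem_filter, Finset.mem_range]; exact ⟨hjn, hjb⟩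
  rw [← heq] at this
  simp only [Finset.mem_image, Finset.mem_range] at this
  obtain ⟨s, hs, hsj⟩ := this
  exact ⟨s, hs, hsj⟩

theorem visW_getD (n kr g b t j : Nat) (hj : j < n) :
    (visW n kr g b t).getD j false
      = decide (j % g < b ∨ ∃ s < t, idxW n kr b s = j) :=
  PySem.List.getD_map_range _ n j false hj

theorem visP_getD (n g b j : Nat) (hj : j < n) :
    (visP n g b).getD j false = decide (j % g < b) :=
  PySem.List.getD_map_range _ n j false hj

theorem visW_zero (n kr g b : Nat) : visW n kr g b 0 = visP n g b := by
  unfold visW visP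
  apply List.map_congr_left
  intro j _
  simp

theorem visW_set (n kr g b t : Nat) :
    (visW n kr g b t).set (idxW n kr b t) true = visW n kr g b (t+1) := by
  apply List.ext_getElem
  · simp [visW]
  · intro i h1 h2
    simp only [visW, List.length_set, List.length_map, List.length_range] at h1 h2 ⊢
    rw [List.getElem_set]
    simp only [List.getElem_map, List.getElem_range]
    split_ifs with hEq
    · subst hEq
      exact (decide_eq_true (Or.inr ⟨t, Nat.lt_succ_self t, rfl⟩)).symm
    · apply decide_eq_decide.mpr
      constructor
      · rintro (h | ⟨s, hs, rfl⟩)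
        · exact Or.inl h
        · exact Or.inr ⟨s, by omega, rfl⟩
      · rintro (h | ⟨s, hs, hsi⟩)
        · exact Or.inl h
        · refine Or.inr ⟨s, ?_, hsi⟩
          rcases Nat.lt_succ_iff_lt_or_eq.mp hs with h' | h'
          · exact h'
          · subst h'; exact absurd hsi hEq

theorem visW_ord (n kr b : Nat) (hn : 0 < n) (hb : b < Nat.gcd n kr) :
    visW n kr (Nat.gcd n kr) b (n / Nat.gcd n kr) = visP n (Nat.gcd n kr) (b+1) := by
  set g := Nat.gcd n kr with hgdef
  apply List.map_congr_left
  intro j hj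
  rw [List.mem_range] at hj
  apply decide_eq_decide.mpr
  constructor
  · rintro (h | ⟨s, _, rfl⟩)
    · omega
    · have h2 := idx_mod n kr b s hb
      rw [← hgdef] at h2
      omega
  · intro h
    rcases Nat.lt_succ_iff_lt_or_eq.mp h with h' | h'
    · exact Or.inl h'
    · exact Or.inr (idx_surj n kr b hn hb j hj h')

theorem walk_eq (arr : List Int) (k : Int) (n : Nat) (hn : 0 < n) (b : Nat)
    (hb : b < Nat.gcd n (PySem.Int.mod k (n : Int)).toNat) :
    ∀ d t fuel, t + d = n / Nat.gcd n (PySem.Int.mod k (n : Int)).toNat → d < fuel →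
    walkA arr k n fuel (idxW n (PySem.Int.mod k (n : Int)).toNat b t)
        (visW n (PySem.Int.mod k (n : Int)).toNat (Nat.gcd n (PySem.Int.mod k (n : Int)).toNat) b t)
        (orbL arr n (PySem.Int.mod k (n : Int)).toNat b t)
      = (visW n (PySem.Int.mod k (n : Int)).toNat (Nat.gcd n (PySem.Int.mod k (n : Int)).toNat) b
           (n / Nat.gcd n (PySem.Int.mod k (n : Int)).toNat),
         orbL arr n (PySem.Int.mod k (n : Int)).toNat b
           (n / Nat.gcd n (PySem.Int.mod k (n : Int)).toNat)) := by
  set kr := (PySem.Int.mod k (n : Int)).toNat with hkrdef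
  set g := Nat.gcd n kr with hgdef
  set N := n / g with hNdef
  have hg : 0 < g := Nat.gcd_pos_of_pos_left kr hn
  have hgn : g ∣ n := Nat.gcd_dvd_left n kr
  have hgle : g ≤ n := Nat.le_of_dvd hn hgn
  have hbn : b < n := lt_of_lt_of_le hb hgle
  have hN : 0 < N := Nat.div_pos hgle hg
  intro d
  induction d with
  | zero =>
    intro t fuel ht hfuel
    obtain ⟨f, rfl⟩ : ∃ f, fuel = f + 1 := ⟨fuel - 1, by omega⟩
    have ht' : t = N := by omega
    subst ht'
    show walkA arr k n (f+1) (idxW n kr b N) _ _ = _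
    rw [walkA]
    have hlook : (visW n kr g b N).getD (idxW n kr b N) false = true := by
      rw [visW_getD _ _ _ _ _ _ (idx_lt n kr b N hn)]
      have : ∃ s < N, idxW n kr b s = idxW n kr b N := by
        refine ⟨0, hN, ?_⟩
        rw [idx_zero n kr b hbn, idx_ord n kr b hn hbn]
      simp [this]
    rw [hlook]
    simp
  | succ d ih =>
    intro t fuel ht hfuel
    obtain ⟨f, rfl⟩ : ∃ f, fuel = f + 1 := ⟨fuel - 1, by omega⟩
    have htN : t < N := by omega
    show walkA arr k n (f+1) (idxW n kr b t) _ _ = _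
    rw [walkA]
    have hlook : (visW n kr g b t).getD (idxW n kr b t) false = false := by
      rw [visW_getD _ _ _ _ _ _ (idx_lt n kr b t hn)]
      apply decide_eq_false
      rintro (h | ⟨s, hs, hsi⟩)
      · rw [idx_mod n kr b t hb] at h; omega
      · have := idx_inj n kr b hn (by omega : s < N) htN hsi
        omega
    rw [hlook]
    simp only [Bool.false_eq_true, if_false]
    have hx : (PySem.Int.mod ((idxW n kr b t : Int) + k) (n : Int)).toNat = idxW n kr b (t+1) := by
      rw [step_eq k n hn, ← hkrdef, ← idx_step]
    have hvis : (visW n kr g b t).set (idxW n kr b t) true = visW n kr g b (t+1) :=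
      visW_set n kr g b t
    have horb : orbL arr n kr b t ++ [arr.getD (idxW n kr b t) 0] = orbL arr n kr b (t+1) := by
      unfold orbL
      rw [List.range_succ, List.map_append]
      rfl
    rw [hx, hvis, horb]
    exact ih (t+1) f (by omega) (by omega)

theorem costL_perm (l l' : List Int) (h : l.Perm l') : costL l = costL l' := by
  unfold costL
  rw [PySem.List.sorted_eq_sorted_of_perm l l' (fun v => v) (fun a b hh => hh) h, h.length_eq]
  exact (h.map _).sum_eq

theorem cycB_eq (arr : List Int) (n g b : Nat) (hn : 0 < n) (hg : 0 < g) (hgn : g ∣ n)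
    (hb : b < g) :
    cycB arr n g b = (List.range (n / g)).map (fun i => arr.getD (b + i * g) 0) := by
  have hgle : g ≤ n := Nat.le_of_dvd hn hgn
  unfold cycB
  rw [PySem.List.pyRange_of_pos _ _ (by exact_mod_cast hg)]
  have hblt : (b : Int) < (n : Int) := by exact_mod_cast lt_of_lt_of_le hb hgle
  rw [if_pos hblt]
  have h2 : ((n : Int) - b + g - 1) = ((n + (g - 1 - b) : Nat) : Int) := by push_cast; omega
  have h3 : (((n + (g - 1 - b) : Nat) : Int) / (g : Int)) = (((n + (g - 1 - b)) / g : Nat) : Int) := by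
    exact (Int.natCast_ediv (n + (g - 1 - b)) g).symm
  have h4 : (n + (g - 1 - b)) / g = n / g := by
    obtain ⟨q, hq⟩ := hgn
    have hq' : n / g = q := by rw [hq]; exact Nat.mul_div_cancel_left q hg
    rw [hq', hq, show g * q + (g - 1 - b) = (g - 1 - b) + q * g by ring,
        Nat.add_mul_div_right _ _ hg, Nat.div_eq_of_lt (by omega)]
    omega
  rw [h2, h3, h4, Int.toNat_natCast, List.map_map]
  apply List.map_congr_left
  intro i _
  show PySem.List.pyGetD arr ((b : Int) + g * i) 0 = arr.getD (b + i * g) 0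
  rw [show ((b : Int) + g * i) = ((b + i * g : Nat) : Int) by push_cast; ring,
      PySem.List.pyGetD_natCast]

theorem orb_perm (arr : List Int) (k : Int) (n : Nat) (hn : 0 < n) (b : Nat)
    (hb : b < Nat.gcd n (PySem.Int.mod k (n : Int)).toNat) :
    (orbL arr n (PySem.Int.mod k (n : Int)).toNat b
        (n / Nat.gcd n (PySem.Int.mod k (n : Int)).toNat)).Perm
      (cycB arr n (Nat.gcd n (PySem.Int.mod k (n : Int)).toNat) b) := by
  set kr := (PySem.Int.mod k (n : Int)).toNat with hkrdef
  set g := Nat.gcd n kr with hgdef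
  set N := n / g with hNdef
  have hg : 0 < g := Nat.gcd_pos_of_pos_left kr hn
  have hgn : g ∣ n := Nat.gcd_dvd_left n kr
  rw [cycB_eq arr n g b hn hg hgn hb]
  have h1 : orbL arr n kr b N
      = ((List.range N).map (fun s => idxW n kr b s)).map (fun j => arr.getD j 0) := by
    unfold orbL; rw [List.map_map]; rfl
  have h2 : (List.range N).map (fun i => arr.getD (b + i * g) 0)
      = ((List.range N).map (fun i => b + i * g)).map (fun j => arr.getD j 0) := by
    rw [List.map_map]; rfl
  rw [h1, h2]
  apply List.Perm.map
  apply (List.perm_ext_iff_of_nodup ?_ ?_).mpr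
  · intro j
    simp only [List.mem_map, List.mem_range]
    constructor
    · rintro ⟨s, hs, rfl⟩
      have hj1 : idxW n kr b s < n := idx_lt n kr b s hn
      have hj2 : idxW n kr b s % g = b := idx_mod n kr b s hb
      obtain ⟨i, hi, hieq⟩ : ∃ i < N, b + i * g = idxW n kr b s := by
        have hmem : idxW n kr b s ∈ (Finset.range n).filter (fun j => j % g = b) := by
          simp only [Finset.mem_filter, Finset.mem_range]; exact ⟨hj1, hj2⟩
        rw [class_eq_image n g b hg hgn hb] at hmem
        simp only [Finset.mem_image, Finset.mem_range] at hmem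
        obtain ⟨i, hi, hieq⟩ := hmem
        exact ⟨i, hi, hieq⟩
      exact ⟨i, hi, hieq⟩
    · rintro ⟨i, hi, rfl⟩
      have hmem : b + i * g ∈ (Finset.range n).filter (fun j => j % g = b) := by
        rw [class_eq_image n g b hg hgn hb]
        simp only [Finset.mem_image, Finset.mem_range]
        exact ⟨i, hi, rfl⟩
      simp only [Finset.mem_filter, Finset.mem_range] at hmem
      obtain ⟨s, hs, hseq⟩ := idx_surj n kr b hn hb _ hmem.1 hmem.2
      exact ⟨s, hs, hseq⟩
  · apply List.Nodup.map_on
    · intro s hs t ht h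
      rw [List.mem_range] at hs ht
      exact idx_inj n kr b hn hs ht h
    · exact List.nodup_range
  · apply List.Nodup.map_on
    · intro s _ t _ h
      have : s * g = t * g := by omega
      exact Nat.eq_of_mul_eq_mul_right hg this
    · exact List.nodup_range

theorem foldl_skip (arr : List Int) (k : Int) (n : Nat) :
    ∀ (is : List Nat) (st : List Bool × Int), (∀ i ∈ is, st.1.getD i false = true) →
    is.foldl (bodyA arr k n) st = st := by
  intro is
  induction is with
  | nil => intro st _; rfl
  | cons i is ih =>
    intro st h
    rw [List.foldl_cons]
    have hb : bodyA arr k n st i = st := by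
      unfold bodyA; rw [h i (by simp)]; simp
    rw [hb]
    exact ih st (fun j hj => h j (by simp [hj]))

theorem foldl_bodyB (arr : List Int) (n g : Nat) :
    ∀ (l : List Nat) (acc : Int),
    l.foldl (bodyB arr n g) acc = acc + (l.map (fun b => costL (cycB arr n g b))).sum := by
  intro l
  induction l with
  | nil => intro acc; simp
  | cons b l ih =>
    intro acc
    rw [List.foldl_cons, ih]
    have hb : bodyB arr n g acc b = acc + costL (cycB arr n g b) := rfl
    rw [hb, List.map_cons, List.sum_cons, add_assoc]

theorem outer_main (arr : List Int) (k : Int) (n : Nat) (hn : 0 < n) :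
    ∀ (d b : Nat) (acc : Int),
    b + d = Nat.gcd n (PySem.Int.mod k (n : Int)).toNat →
    (List.range' b (n - b)).foldl (bodyA arr k n)
        (visP n (Nat.gcd n (PySem.Int.mod k (n : Int)).toNat) b, acc)
      = (visP n (Nat.gcd n (PySem.Int.mod k (n : Int)).toNat)
           (Nat.gcd n (PySem.Int.mod k (n : Int)).toNat),
         acc + ((List.range' b d).map
           (fun c => costL (cycB arr n (Nat.gcd n (PySem.Int.mod k (n : Int)).toNat) c))).sum) := by
  set kr := (PySem.Int.mod k (n : Int)).toNat with hkrdef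
  set G := Nat.gcd n kr with hGdef
  set N := n / G with hNdef
  have hG : 0 < G := Nat.gcd_pos_of_pos_left kr hn
  have hGn : G ∣ n := Nat.gcd_dvd_left n kr
  have hGle : G ≤ n := Nat.le_of_dvd hn hGn
  intro d
  induction d with
  | zero =>
    intro b acc hbd
    obtain rfl : b = G := by omega
    rw [foldl_skip arr k n _ _ ?_]
    · simp
    · intro i hi
      rw [List.mem_range'_1] at hi
      have hin : i < n := by omega
      rw [visP_getD n G G i hin]
      simp [Nat.mod_lt i hG]
  | succ d ih =>
    intro b acc hbd
    have hbG : b < G := by omega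
    have hbn : b < n := lt_of_lt_of_le hbG hGle
    have horb0 : orbL arr n kr b 0 = [] := rfl
    have hN1 : 0 + N = n / Nat.gcd n (PySem.Int.mod k (n : Int)).toNat := by
      rw [hNdef, hGdef, hkrdef]
      omega
    have hN2 : N < n + 1 := by
      rw [hNdef]; have := Nat.div_le_self n G; omega
    have hwalk := walk_eq arr k n hn b hbG N 0 (n+1) hN1 hN2
    rw [idx_zero n kr b hbn, visW_zero n kr G b, horb0, visW_ord n kr b hn hbG] at hwalk
    have hlook : (visP n G b).getD b false = false := by
      rw [visP_getD n G b b hbn]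
      simp [Nat.mod_eq_of_lt hbG]
    have hstep : bodyA arr k n (visP n G b, acc) b
        = (visP n G (b+1), acc + costL (cycB arr n G b)) := by
      simp only [bodyA, hlook, Bool.false_eq_true, if_false]
      rw [hwalk]
      show (visP n G (b+1), acc + costL (orbL arr n kr b N)) = _
      rw [costL_perm _ _ (orb_perm arr k n hn b hbG)]
    rw [show n - b = (n - b - 1) + 1 by omega, List.range'_succ, List.foldl_cons, hstep,
        show n - b - 1 = n - (b+1) by omega, ih (b+1) (acc + costL (cycB arr n G b)) (by omega),
        List.range'_succ, List.map_cons, List.sum_cons, add_assoc]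

theorem main_pos (arr : List Int) (k : Int) (hn : 0 < arr.length) :
    makeSubKSumEqual arr k = makeSubKSumEqual_alt arr k := by
  simp only [makeSubKSumEqual, makeSubKSumEqual_alt]
  rw [if_neg (by omega)]
  have hrep : (List.replicate arr.length false, (0:Int))
      = (visP arr.length (Nat.gcd arr.length (PySem.Int.mod k (arr.length : Int)).toNat) 0,
         (0:Int)) := by
    unfold visP
    congr 1
    rw [eq_comm, List.eq_replicate_iff]
    simp
  have h := outer_main arr k arr.length hn
    (Nat.gcd arr.length (PySem.Int.mod k (arr.length : Int)).toNat) 0 0 (by omega)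
  rw [Nat.sub_zero] at h
  rw [hrep, List.range_eq_range', h,
      foldl_bodyB arr arr.length (Nat.gcd arr.length (PySem.Int.mod k (arr.length : Int)).toNat)
        (List.range (Nat.gcd arr.length (PySem.Int.mod k (arr.length : Int)).toNat)) 0]
  simp [List.range_eq_range']

theorem makeSubKSumEqual_eq (arr : List Int) (k : Int) :
    makeSubKSumEqual arr k = makeSubKSumEqual_alt arr k := by
  rcases arr with _ | ⟨a0, tl⟩
  · rfl
  · exact main_pos (a0 :: tl) k (by simp)

-- ===== VERDICT (by name: the statement is the Claim_ definition above) =====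
theorem makeSubKSumEqual_spec : Claim_equal_makeSubKSumEqual := by
  intro arr k _
  show makeSubKSumEqual arr k = makeSubKSumEqual_alt arr k
  exact makeSubKSumEqual_eq arr k
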